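-- pv_equiv track=rewrite | github.com/theaeolianmachine/aoc2024 | day7/day7.py | part_one
-- ===== SOURCE A (Python) =====
-- from itertools import product
--
-- def calc_test_value(first_value: int, expression: list[tuple[int, str]]) -> int:
--     calc = first_value
--     for operand, op in expression:
--         if op == "+":
--             calc += operand
--         elif op == "*":
--             calc *= operand
--         elif op == "|":
--             calc = int(str(calc) + str(operand))
--         else:
--             raise ValueError("Bad operator")
--     return calc
--
-- def part_one(equations: list[tuple[int, tuple[int, ...]]]) -> int:
--     operators = ("+", "*")
--     total_calibration_result = 0
--     for equation in equations:
--         output, operands = equation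
--         num_operators = len(operands) - 1
--         for perm in list(product(operators, repeat=num_operators)):
--             current_calc = operands[0]
--             zipped_expression: list[tuple[int, str]] = list(zip(operands[1:], perm))
--             test_value = calc_test_value(current_calc, zipped_expression)
--             if output == test_value:
--                 total_calibration_result += output
--                 break
--     return total_calibration_result
-- ===== SOURCE B (Python) =====
-- def part_one(equations):
--     total = 0
--     for output, operands in equations:
--         reachable = {operands[0]}
--         for x in operands[1:]:
--             reachable = {v + x for v in reachable} | {v * x for v in reachable}
--         if output in reachable:
--             total += output
--     return total
-- ===== Notes on version B (the rewrite author's own statement) =====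
-- stated objective: faster
-- what changed: Replaces enumeration of all 2^(n-1) operator tuples (re-evaluating each tuple via calc_test_value) by a forward set-DP over the operands keeping the deduplicated set of reachable values, with one membership test per equation; Pre_ excludes equations whose operand tuple is empty, where A raises ValueError (product repeat=-1) and B raises IndexError (operands[0]).
import Mathlib
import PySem

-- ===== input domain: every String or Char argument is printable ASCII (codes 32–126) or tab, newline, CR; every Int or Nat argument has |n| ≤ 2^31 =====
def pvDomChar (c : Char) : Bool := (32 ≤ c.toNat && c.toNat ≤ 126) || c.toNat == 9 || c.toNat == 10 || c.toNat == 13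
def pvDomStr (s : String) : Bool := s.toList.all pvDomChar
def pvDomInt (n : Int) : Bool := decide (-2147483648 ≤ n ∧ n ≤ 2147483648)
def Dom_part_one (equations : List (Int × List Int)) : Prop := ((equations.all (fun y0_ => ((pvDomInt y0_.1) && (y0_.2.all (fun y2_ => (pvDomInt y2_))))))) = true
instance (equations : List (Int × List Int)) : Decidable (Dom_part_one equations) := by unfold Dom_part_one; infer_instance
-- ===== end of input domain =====

-- B replaces the enumeration of all operator tuples by a forward set-DP of reachable
-- values (deduplicated), testing target membership once per equation.

-- ===== PORT A =====
def calc_test_value (first_value : Int) (expression : List (Int × String)) : Int :=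
  expression.foldl (fun acc p =>
    if p.2 = "+" then acc + p.1
    else if p.2 = "*" then acc * p.1
    else acc  -- the "|" branch and the ValueError raise are unreachable: part_one passes only "+"/"*"
  ) first_value

-- list(product(("+", "*"), repeat=n)) in itertools order (leftmost component varies slowest)
def opProduct : Nat → List (List String)
  | 0 => [[]]
  | n+1 => (["+", "*"]).flatMap (fun o => (opProduct n).map (fun p => o :: p))

-- the inner 'for perm in …: … ; if output == test_value: total += output; break'
def tryPerms (output : Int) (operands : List Int) : List (List String) → Int
  | [] => 0
  | perm :: rest =>
      -- operands[0] (Pre_ excludes empty operands, where A raises); zip(operands[1:], perm)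
      let test_value := calc_test_value (operands.headD 0) ((operands.drop 1).zip perm)
      if output = test_value then output else tryPerms output operands rest

def part_one (equations : List (Int × List Int)) : Int :=
  equations.foldl (fun total eq =>
    total + tryPerms eq.1 eq.2 (opProduct (eq.2.length - 1))) 0

-- ===== PORT B =====
def part_one_alt (equations : List (Int × List Int)) : Int :=
  equations.foldl (fun total eq =>
    let reachable : PySem.Set Int :=
      (eq.2.drop 1).foldl
        (fun r x => PySem.Set.union (PySem.Set.ofList (r.map (· + x))) (r.map (· * x)))
        (PySem.Set.ofList [eq.2.headD 0])
    if eq.1 ∈ reachable then total + eq.1 else total) 0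

-- ===== PRECONDITION & SPEC =====
-- Pre_ excludes equations with an empty operand tuple: there A raises ValueError
-- (product(…, repeat=-1)) and B raises IndexError (operands[0]).
def Pre_part_one (equations : List (Int × List Int)) : Prop :=
  ∀ eq ∈ equations, eq.2 ≠ []
instance (equations : List (Int × List Int)) : Decidable (Pre_part_one equations) := by
  unfold Pre_part_one; infer_instance
def pvWitness_part_one : (List (Int × List Int)) := [(3, [1, 2]), (10, [2, 5])]

def Spec_part_one (equations : List (Int × List Int)) (out : Int) : Prop := out = part_one_alt equations
instance (equations : List (Int × List Int)) (out : Int) : Decidable (Spec_part_one equations out) := by unfold Spec_part_one; infer_instance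

-- ===== CLAIM (what is proved, stated in full; the proofs are below) =====
def Claim_equal_part_one : Prop := ∀ (equations : List (Int × List Int)), Dom_part_one equations → Pre_part_one equations → Spec_part_one equations (part_one equations)

-- ===== LEMMAS AND PROOFS =====

-- A's inner loop returns output iff some perm evaluates to output
theorem tryPerms_eq (output : Int) (operands : List Int) (perms : List (List String)) :
    tryPerms output operands perms =
      if ∃ p ∈ perms, calc_test_value (operands.headD 0) ((operands.drop 1).zip p) = output
      then output else 0 := by
  induction perms with
  | nil => simp [tryPerms]
  | cons p rest ih =>
      simp only [tryPerms, ih]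
      by_cases h : output = calc_test_value (operands.headD 0) ((operands.drop 1).zip p)
      · rw [if_pos h, if_pos ⟨p, List.mem_cons_self, h.symm⟩]
      · rw [if_neg h]
        have hiff : (∃ q ∈ p :: rest,
              calc_test_value (operands.headD 0) ((operands.drop 1).zip q) = output) ↔
            (∃ q ∈ rest, calc_test_value (operands.headD 0) ((operands.drop 1).zip q) = output) := by
          constructor
          · rintro ⟨q, hq, he⟩
            rcases List.mem_cons.1 hq with rfl | hq'
            · exact absurd he.symm h
            · exact ⟨q, hq', he⟩
          · rintro ⟨q, hq, he⟩
            exact ⟨q, List.mem_cons_of_mem p hq, he⟩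
        rw [if_congr hiff rfl rfl]

theorem mem_opProduct_succ (n : Nat) (q : List String) :
    q ∈ opProduct (n+1) ↔ ∃ o ∈ ["+", "*"], ∃ p ∈ opProduct n, q = o :: p := by
  simp only [opProduct, List.flatMap_cons, List.flatMap_nil, List.mem_append,
    List.mem_map, List.append_nil]
  constructor
  · rintro (⟨a, ha, rfl⟩ | ⟨a, ha, rfl⟩)
    · exact ⟨"+", by simp, a, ha, rfl⟩
    · exact ⟨"*", by simp, a, ha, rfl⟩
  · rintro ⟨o, ho, a, ha, rfl⟩
    rcases List.mem_cons.1 ho with rfl | ho'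
    · exact Or.inl ⟨a, ha, rfl⟩
    · rcases List.mem_cons.1 ho' with rfl | h
      · exact Or.inr ⟨a, ha, rfl⟩
      · cases h

-- membership in B's reachable set after folding xs, for an arbitrary start set S
theorem reach_mem (xs : List Int) (S : PySem.Set Int) (v : Int) :
    v ∈ xs.foldl
        (fun r x => PySem.Set.union (PySem.Set.ofList (r.map (· + x))) (r.map (· * x))) S
      ↔ ∃ c ∈ S, ∃ p ∈ opProduct xs.length, calc_test_value c (xs.zip p) = v := by
  induction xs generalizing S with
  | nil => simp [opProduct, calc_test_value]
  | cons x xs ih =>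
      simp only [List.foldl_cons, List.length_cons, ih]
      constructor
      · rintro ⟨c, hc, p, hp, hv⟩
        rw [PySem.Set.mem_union, PySem.Set.mem_ofList] at hc
        rcases hc with hc | hc <;>
          · simp only [List.mem_map] at hc
            rcases hc with ⟨c0, hc0, rfl⟩
            refine ⟨c0, hc0, ?_⟩
            first
          | exact ⟨"+" :: p, by
                rw [mem_opProduct_succ]; exact ⟨"+", by simp, p, hp, rfl⟩,
                by simpa [calc_test_value] using hv⟩
          | exact ⟨"*" :: p, by
                rw [mem_opProduct_succ]; exact ⟨"*", by simp, p, hp, rfl⟩,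
                by simpa [calc_test_value] using hv⟩
      · rintro ⟨c, hc, q, hq, hv⟩
        rw [mem_opProduct_succ] at hq
        rcases hq with ⟨o, ho, p, hp, rfl⟩
        simp only [List.mem_cons] at ho
        rcases ho with rfl | rfl | h
        · exact ⟨c + x, by
              rw [PySem.Set.mem_union, PySem.Set.mem_ofList]
              exact Or.inl (List.mem_map.2 ⟨c, hc, rfl⟩),
            p, hp, by simpa [calc_test_value] using hv⟩
        · exact ⟨c * x, by
              rw [PySem.Set.mem_union]
              exact Or.inr (List.mem_map.2 ⟨c, hc, rfl⟩),
            p, hp, by simpa [calc_test_value] using hv⟩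
        · cases h

-- per-equation agreement (operands nonempty)
theorem eq_contribution (output : Int) (operands : List Int) (h : operands ≠ []) :
    tryPerms output operands (opProduct (operands.length - 1)) =
      if output ∈ operands.tail.foldl
          (fun r x => PySem.Set.union (PySem.Set.ofList (r.map (· + x))) (r.map (· * x)))
          (PySem.Set.ofList [operands.headD 0])
      then output else (0 : Int) := by
  cases operands with
  | nil => exact absurd rfl h
  | cons c xs =>
      rw [tryPerms_eq]
      congr 1
      simp only [List.tail_cons, List.drop_succ_cons, List.drop_zero, List.headD_cons,
        List.length_cons, Nat.add_sub_cancel]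
      rw [eq_iff_iff, reach_mem]
      constructor
      · rintro ⟨p, hp, hv⟩
        exact ⟨c, by simp [PySem.Set.mem_ofList], p, hp, hv⟩
      · rintro ⟨c', hc', p, hp, hv⟩
        rw [PySem.Set.mem_ofList, List.mem_singleton] at hc'
        subst hc'
        exact ⟨p, hp, hv⟩

theorem fold_eq (eqs : List (Int × List Int)) (hpre : ∀ eq ∈ eqs, eq.2 ≠ []) (t : Int) :
    eqs.foldl (fun total eq => total + tryPerms eq.1 eq.2 (opProduct (eq.2.length - 1))) t =
    eqs.foldl (fun total eq =>
      let reachable : PySem.Set Int :=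
        (eq.2.drop 1).foldl
          (fun r x => PySem.Set.union (PySem.Set.ofList (r.map (· + x))) (r.map (· * x)))
          (PySem.Set.ofList [eq.2.headD 0])
      if eq.1 ∈ reachable then total + eq.1 else total) t := by
  induction eqs generalizing t with
  | nil => rfl
  | cons e rest ih =>
      simp only [List.foldl_cons]
      rw [eq_contribution e.1 e.2 (hpre e List.mem_cons_self)]
      rw [ih (fun eq h => hpre eq (List.mem_cons_of_mem e h))]
      congr 1
      simp only [List.drop_one]
      split_ifs <;> simp

-- ===== VERDICT (by name: the statement is the Claim_ definition above) =====
theorem part_one_spec : Claim_equal_part_one := by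
  intro equations _ hpre
  unfold Spec_part_one part_one part_one_alt
  exact fold_eq equations hpre 0
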